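-- pv_equiv track=rewrite | github.com/meetyourvallabh/student-connect | abc.py | parenthetic_contents
-- ===== SOURCE A (Python) =====
-- def parenthetic_contents(string):
--     """Generate parenthesized contents in string as pairs (level, contents)."""
--     stack = []
--     for i, c in enumerate(string):
--         if c == '[':
--             stack.append(i)
--         elif c == ']' and stack:
--             start = stack.pop()
--             yield(string[start-1], string[start + 1: i])
-- ===== SOURCE B (Python) =====
-- def _find_open(string, i):
--     """Index of the '[' matching the ']' at i, scanning backwards with a
--     balance counter; None if unmatched."""
--     bal = 0
--     j = i - 1
--     while j >= 0:
--         ch = string[j]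
--         if ch == ']':
--             bal += 1
--         elif ch == '[':
--             if bal == 0:
--                 return j
--             bal -= 1
--         j -= 1
--     return None
--
--
-- def parenthetic_contents(string):
--     """Generate parenthesized contents in string as pairs (level, contents)."""
--     for i, c in enumerate(string):
--         if c == ']':
--             start = _find_open(string, i)
--             if start is not None:
--                 yield (string[start - 1], string[start + 1: i])
-- ===== Notes on version B (the rewrite author's own statement) =====
-- stated objective: alternative
-- what changed: Replaces the incremental stack of open-bracket indices by a stackless scan: for each ']' a backward balance-counting scan locates its matching '[' directly.
import Mathlib
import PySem

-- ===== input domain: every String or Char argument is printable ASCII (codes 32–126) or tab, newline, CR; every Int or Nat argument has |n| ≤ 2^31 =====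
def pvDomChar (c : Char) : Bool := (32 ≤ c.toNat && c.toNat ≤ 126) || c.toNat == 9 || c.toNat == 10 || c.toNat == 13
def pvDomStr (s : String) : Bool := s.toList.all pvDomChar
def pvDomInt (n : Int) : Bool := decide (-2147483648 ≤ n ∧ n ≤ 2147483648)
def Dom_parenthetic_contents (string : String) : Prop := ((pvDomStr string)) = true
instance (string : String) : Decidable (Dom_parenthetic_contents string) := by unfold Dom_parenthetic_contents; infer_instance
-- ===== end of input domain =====

-- B replaces A's stack of open-bracket indices by a stackless backward balance-counting
-- scan per ']' (alternative decomposition, not claimed faster). Return value only: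
-- both Pythons are generators; we port the list of yielded pairs.

-- ===== PORT A =====
-- the yielded pair (string[start-1], string[start+1:i]); start-1 may be -1 (Python wraps
-- to the last char); the pyGetD default is unreachable since the string is nonempty there
def pvPair (cs : List Char) (start i : Int) : String × String :=
  (String.ofList [PySem.List.pyGetD cs (start - 1) ' '],
   String.ofList (PySem.List.slice cs (some (start + 1)) (some i)))

-- one iteration of A's for-loop: state = (stack, yields so far)
def pvStepA (cs : List Char) (st : List Int × List (String × String))
    (ic : Int × Char) : List Int × List (String × String) :=
  if ic.2 = '[' then (ic.1 :: st.1, st.2)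
  else if ic.2 = ']' then
    match st.1 with
    | [] => st
    | start :: rest => (rest, st.2 ++ [pvPair cs start ic.1])
  else st

def parenthetic_contents (string : String) : List (String × String) :=
  ((PySem.List.enumerate string.toList).foldl (pvStepA string.toList) ([], [])).2

-- ===== PORT B =====
-- _find_open: the while-loop 'j = i-1 down to 0' as recursion on fuel k = j+1;
-- the getD default is unreachable (j < i ≤ len)
def pvFindOpen (cs : List Char) : Nat → Nat → Option Int
  | 0, _ => none
  | j + 1, bal =>
    let ch := cs.getD j ' '
    if ch = ']' then pvFindOpen cs j (bal + 1)
    else if ch = '[' then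
      (if bal = 0 then some (j : Int) else pvFindOpen cs j (bal - 1))
    else pvFindOpen cs j bal

-- one iteration of B's for-loop: state = yields so far
def pvStepB (cs : List Char) (out : List (String × String))
    (ic : Int × Char) : List (String × String) :=
  if ic.2 = ']' then
    match pvFindOpen cs ic.1.toNat 0 with
    | none => out
    | some s => out ++ [pvPair cs s ic.1]
  else out

def parenthetic_contents_alt (string : String) : List (String × String) :=
  (PySem.List.enumerate string.toList).foldl (pvStepB string.toList) []

-- ===== PRECONDITION & SPEC =====
def Spec_parenthetic_contents (string : String) (out : List (String × String)) : Prop := out = parenthetic_contents_alt string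
instance (string : String) (out : List (String × String)) : Decidable (Spec_parenthetic_contents string out) := by unfold Spec_parenthetic_contents; infer_instance

-- ===== CLAIM (what is proved, stated in full; the proofs are below) =====
def Claim_equal_parenthetic_contents : Prop := ∀ (string : String), Dom_parenthetic_contents string → Spec_parenthetic_contents string (parenthetic_contents string)

-- ===== LEMMAS AND PROOFS =====

-- the invariant: after the first n characters, A's yields equal B's yields, and the
-- backward scan from position n with initial balance b finds the b-th entry of A's stack
theorem pvInv (cs : List Char) (n : Nat) (hn : n ≤ cs.length) :
    (((PySem.List.enumerate cs).take n).foldl (pvStepA cs) ([], [])).2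
      = ((PySem.List.enumerate cs).take n).foldl (pvStepB cs) []
    ∧ ∀ b : Nat, pvFindOpen cs n b
      = (((PySem.List.enumerate cs).take n).foldl (pvStepA cs) ([], [])).1[b]? := by
  induction n with
  | zero => simp [pvFindOpen]
  | succ n ih =>
    obtain ⟨ihOut, ihStack⟩ := ih (Nat.le_of_succ_le hn)
    have hlt : n < cs.length := hn
    have henum : (PySem.List.enumerate cs)[n]? = some ((n : Int), cs[n]) := by
      rw [PySem.List.getElem?_enumerate]
      simp [List.getElem?_eq_getElem hlt]
    rw [List.take_add_one, henum]
    simp only [Option.toList_some, List.foldl_append, List.foldl_cons, List.foldl_nil]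
    set st := ((PySem.List.enumerate cs).take n).foldl (pvStepA cs) ([], []) with hst
    set outB := ((PySem.List.enumerate cs).take n).foldl (pvStepB cs) [] with houtB
    have hsome : cs[n]? = some cs[n] := List.getElem?_eq_getElem hlt
    by_cases h1 : cs[n] = '['
    · refine ⟨?_, fun b => ?_⟩
      · simp [pvStepA, pvStepB, h1, ihOut]
      · show pvFindOpen cs (n + 1) b = _
        cases b with
        | zero => simp [pvFindOpen, hsome, h1, pvStepA]
        | succ b => simp [pvFindOpen, hsome, h1, pvStepA, ihStack b]
    · by_cases h2 : cs[n] = ']'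
      · have hscan : ∀ b : Nat, pvFindOpen cs (n + 1) b = pvFindOpen cs n (b + 1) := by
          intro b; simp [pvFindOpen, hsome, h2]
        have h0 : pvFindOpen cs n 0 = st.1[0]? := ihStack 0
        refine ⟨?_, fun b => ?_⟩
        · cases hcs : st.1 with
          | nil =>
            have h0' : pvFindOpen cs n 0 = none := by rw [h0, hcs]; rfl
            simp [pvStepA, pvStepB, h2, hcs, ihOut, h0']
          | cons start rest =>
            have h0' : pvFindOpen cs n 0 = some start := by rw [h0, hcs]; rfl
            simp [pvStepA, pvStepB, h2, hcs, ihOut, h0']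
        · show pvFindOpen cs (n + 1) b = _
          rw [hscan b, ihStack (b + 1)]
          cases hcs : st.1 with
          | nil => simp [pvStepA, h2, hcs]
          | cons start rest => simp [pvStepA, h2, hcs]
      · refine ⟨?_, fun b => ?_⟩
        · simp [pvStepA, pvStepB, h1, h2, ihOut]
        · show pvFindOpen cs (n + 1) b = _
          simp [pvFindOpen, hsome, h1, h2, pvStepA, ihStack b]

-- ===== VERDICT (by name: the statement is the Claim_ definition above) =====
theorem parenthetic_contents_spec : Claim_equal_parenthetic_contents := by
  intro string _
  show _ = _
  unfold parenthetic_contents parenthetic_contents_alt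
  have h := (pvInv string.toList string.toList.length (le_refl _)).1
  rwa [List.take_of_length_le (by rw [PySem.List.length_enumerate])] at h
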